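-- pv_equiv track=rewrite | github.com/varunjain-byte/MISRA-MCP | core/axivion_parser.py | _best_guess_relative
-- ===== SOURCE A (Python) =====
-- def _best_guess_relative(fp_norm: str) -> str:
--     """Heuristically strip build-server prefixes to produce a relative path.
--
--     Given a path like ``/opt/axivion/checkout/source/App/main.c``, try
--     to find a recognisable source-tree root marker (``source/``,
--     ``src/``, ``include/``) and return everything from that marker
--     onward.  If no marker is found, return the filename only.
--     """
--     # Common directory names that typically sit at or near the project root
--     _SOURCE_MARKERS = (
--         "/source/", "/sources/", "/src/", "/include/",
--         "/app/", "/application/", "/lib/", "/core/",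
--         "/modules/", "/components/", "/drivers/",
--     )
--
--     fp_lower = fp_norm.lower()
--     best_idx = len(fp_norm)  # worst case: full path
--
--     for marker in _SOURCE_MARKERS:
--         idx = fp_lower.find(marker)
--         if idx != -1:
--             # Keep from the marker directory onward (strip leading '/')
--             candidate_start = idx + 1  # skip the leading '/'
--             if candidate_start < best_idx:
--                 best_idx = candidate_start
--
--     if best_idx < len(fp_norm):
--         return fp_norm[best_idx:]
--
--     # No marker found — just return the filename portion
--     return fp_norm.rsplit("/", 1)[-1]
-- ===== SOURCE B (Python) =====
-- def _best_guess_relative(fp_norm: str) -> str: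
--     """Strip build-server prefixes: return the path from the first source-tree
--     marker directory onward, else the filename. Segment-scan reimplementation."""
--     _MARKER_NAMES = {
--         "source", "sources", "src", "include",
--         "app", "application", "lib", "core",
--         "modules", "components", "drivers",
--     }
--     segments = fp_norm.split("/")
--     # a marker needs a '/' before and after it, so only interior segments count
--     for i in range(1, len(segments) - 1):
--         if segments[i].lower() in _MARKER_NAMES:
--             return "/".join(segments[i:])
--     return segments[-1]
-- ===== Notes on version B (the rewrite author's own statement) =====
-- stated objective: idiomatic
-- what changed: Instead of lowering the whole path and running eleven substring searches with slash-delimited marker patterns and keeping the minimal index, B splits the path into slash-separated segments once and returns the tail from the first interior segment whose lowercase form is in a set of bare marker names, falling back to the last segment.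
import Mathlib
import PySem

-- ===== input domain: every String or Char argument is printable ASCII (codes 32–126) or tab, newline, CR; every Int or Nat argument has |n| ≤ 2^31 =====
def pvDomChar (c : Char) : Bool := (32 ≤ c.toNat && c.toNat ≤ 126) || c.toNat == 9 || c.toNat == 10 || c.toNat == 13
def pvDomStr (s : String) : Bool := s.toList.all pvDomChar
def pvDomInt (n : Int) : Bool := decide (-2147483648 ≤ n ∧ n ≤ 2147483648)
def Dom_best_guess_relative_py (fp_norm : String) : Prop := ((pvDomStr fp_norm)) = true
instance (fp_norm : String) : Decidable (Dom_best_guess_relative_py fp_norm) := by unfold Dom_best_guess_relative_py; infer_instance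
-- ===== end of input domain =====

-- B replaces A's eleven lowered-string substring searches for slash-delimited markers by one
-- split into slash-separated segments and a left-to-right scan of the interior segments
-- against a set of bare marker names (idiomatic restructuring; same results).

-- ===== PORT A =====
-- the _SOURCE_MARKERS tuple
def pvMarkers : List (List Char) :=
  ["/source/".toList, "/sources/".toList, "/src/".toList, "/include/".toList,
   "/app/".toList, "/application/".toList, "/lib/".toList, "/core/".toList,
   "/modules/".toList, "/components/".toList, "/drivers/".toList]

def best_guess_relative_py (fp_norm : String) : String :=
  let L := fp_norm.toList
  let fp_lower := PySem.Chars.lower L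
  -- best_idx starts at len(fp_norm); the for-loop over markers keeps the minimal idx+1
  let best_idx : Int := pvMarkers.foldl (fun best marker =>
      let idx := PySem.Chars.find fp_lower marker
      if idx ≠ -1 then
        let candidate_start := idx + 1
        if candidate_start < best then candidate_start else best
      else best) ((PySem.Chars.len L : Int))
  if best_idx < (PySem.Chars.len L : Int) then
    String.ofList (PySem.Chars.slice L (some best_idx) none)
  else
    -- hand port of fp_norm.rsplit("/", 1)[-1] (no PySem rsplit): the last element of a
    -- 1-maxsplit right split is exactly the suffix after the last '/'; the fold keeps the
    -- characters seen since the most recent '/', which is that suffix — exact.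
    String.ofList (L.foldl (fun acc c => if c = '/' then [] else acc ++ [c]) [])

-- ===== PORT B =====
-- the _MARKER_NAMES set
def pvMarkerNames : PySem.Set (List Char) :=
  PySem.Set.ofList
    ["source".toList, "sources".toList, "src".toList, "include".toList,
     "app".toList, "application".toList, "lib".toList, "core".toList,
     "modules".toList, "components".toList, "drivers".toList]

-- the for-loop over interior segments: the argument is segments[i:] for i ≥ 1; a singleton
-- is the (non-interior) last segment, returned as the fallback segments[-1]
def pvAltGo : List (List Char) → List Char
  | [] => []                                  -- unreachable: called on nonempty lists
  | [last] => last
  | seg :: nxt :: rest =>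
      if pvMarkerNames.contains (PySem.Chars.lower seg) then
        PySem.Chars.join ['/'] (seg :: nxt :: rest)
      else pvAltGo (nxt :: rest)

def best_guess_relative_py_alt (fp_norm : String) : String :=
  let segments := PySem.Chars.splitOn fp_norm.toList ['/']   -- fp_norm.split("/")
  match segments with
  | [] => ""                                   -- unreachable: split never returns []
  | [only] => String.ofList only               -- no interior segments: segments[-1]
  | _ :: rest => String.ofList (pvAltGo rest)  -- scan segments[1:], last one = fallback

-- ===== PRECONDITION & SPEC =====
def Spec_best_guess_relative_py (fp_norm : String) (out : String) : Prop := out = best_guess_relative_py_alt fp_norm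
instance (fp_norm : String) (out : String) : Decidable (Spec_best_guess_relative_py fp_norm out) := by unfold Spec_best_guess_relative_py; infer_instance

-- ===== CLAIM (what is proved, stated in full; the proofs are below) =====
def Claim_equal_best_guess_relative_py : Prop := ∀ (fp_norm : String), Dom_best_guess_relative_py fp_norm → Spec_best_guess_relative_py fp_norm (best_guess_relative_py fp_norm)

-- ===== LEMMAS AND PROOFS =====

-- the bare marker names, as a plain list (same literal as in pvMarkerNames)
def pvNames : List (List Char) :=
  ["source".toList, "sources".toList, "src".toList, "include".toList,
   "app".toList, "application".toList, "lib".toList, "core".toList,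
   "modules".toList, "components".toList, "drivers".toList]

def pvMkOf (n : List Char) : List Char := '/' :: (n ++ ['/'])

theorem pvMarkers_eq : pvMarkers = pvNames.map pvMkOf := by decide

theorem pvNames_slashfree : ∀ n ∈ pvNames, '/' ∉ n := by decide

-- does a marker name followed by '/' start here? (position just after a '/')
def pvHit (t : List Char) : Bool :=
  pvNames.any (fun n => (n ++ ['/']).isPrefixOf (PySem.Chars.lower t))

-- index of the first '/' that is followed by marker-name-plus-'/'
def pvR : List Char → Option Nat
  | [] => none
  | c :: t => if c = '/' ∧ pvHit t then some 0 else (pvR t).map (· + 1)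

-- a full marker "/name/" starts at position j of the lowered string
def pvP (L : List Char) (j : Nat) : Prop :=
  ∃ n ∈ pvNames, pvMkOf n <+: (PySem.Chars.lower L).drop j

-- clean structural model of fp_norm.split("/")
def pvSplit1 : List Char → List (List Char)
  | [] => [[]]
  | c :: t => if c = '/' then [] :: pvSplit1 t else (pvSplit1 t).modifyHead (c :: ·)

theorem pvLowerChar_slash_iff (c : Char) : PySem.Chars.lowerChar c = '/' ↔ c = '/' := by
  unfold PySem.Chars.lowerChar PySem.Chars.isupper
  split_ifs with h
  · simp only [decide_eq_true_eq, Bool.and_eq_true, Char.le_def] at h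
    have hA : 'A'.val = 65 := rfl
    have hZ : 'Z'.val = 90 := rfl
    rw [hA, hZ] at h
    have hcv : 65 ≤ c.toNat ∧ c.toNat ≤ 90 := ⟨h.1, h.2⟩
    have hv : (Char.ofNat (c.toNat + 32)).toNat = c.toNat + 32 := by
      rw [Char.toNat_ofNat, if_pos]; exact Or.inl (by omega)
    constructor
    · intro he
      exfalso
      have h2 := congrArg Char.toNat he
      rw [hv] at h2
      have : ('/').toNat = 47 := rfl
      omega
    · intro hc'
      subst hc'
      exfalso
      have : ('/').toNat = 47 := rfl
      omega
  · exact Iff.rfl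

theorem pvSlash_mem_lower {t : List Char} (h : '/' ∉ t) : '/' ∉ PySem.Chars.lower t := by
  intro hm
  unfold PySem.Chars.lower at hm
  rcases List.mem_map.mp hm with ⟨c, hc, he⟩
  exact h ((pvLowerChar_slash_iff c).mp he ▸ hc)

theorem pvHit_false_of_slashfree {t : List Char} (h : '/' ∉ t) : pvHit t = false := by
  rw [Bool.eq_false_iff]
  intro hh
  rcases List.any_eq_true.mp hh with ⟨n, hn, hp⟩
  have hpre := List.isPrefixOf_iff_prefix.mp hp
  have : '/' ∈ PySem.Chars.lower t := hpre.subset (by simp)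
  exact pvSlash_mem_lower h this

theorem pvR_nosep {s : List Char} (h : '/' ∉ s) (l : List Char) :
    pvR (s ++ l) = (pvR l).map (· + s.length) := by
  induction s with
  | nil => cases hl : pvR l <;> simp [hl]
  | cons c s ih =>
    have hc : c ≠ '/' := fun he => h (he ▸ List.mem_cons_self)
    have hs : '/' ∉ s := fun hm => h (List.mem_cons_of_mem _ hm)
    show (if c = '/' ∧ pvHit (s ++ l) then some 0 else (pvR (s ++ l)).map (· + 1))
      = (pvR l).map (· + (c :: s).length)
    rw [if_neg (by intro hh; exact hc hh.1), ih hs]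
    cases hl : pvR l with
    | none => simp
    | some v => simp; omega

theorem pvP_zero (c : Char) (t : List Char) : pvP (c :: t) 0 ↔ (c = '/' ∧ pvHit t = true) := by
  unfold pvP pvHit pvMkOf
  simp only [PySem.Chars.lower, List.map_cons, List.drop_zero, List.cons_prefix_cons,
    List.any_eq_true, List.isPrefixOf_iff_prefix]
  constructor
  · rintro ⟨n, hn, hsl, hp⟩
    exact ⟨(pvLowerChar_slash_iff c).mp hsl.symm, ⟨n, hn, hp⟩⟩
  · rintro ⟨hc, n, hn, hp⟩
    exact ⟨n, hn, ((pvLowerChar_slash_iff c).mpr hc).symm, hp⟩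

theorem pvP_succ (c : Char) (t : List Char) (j : Nat) : pvP (c :: t) (j + 1) ↔ pvP t j := by
  unfold pvP
  simp [PySem.Chars.lower]

theorem pvR_none {L : List Char} (h : pvR L = none) : ∀ j, ¬ pvP L j := by
  induction L with
  | nil =>
    intro j hp
    rcases hp with ⟨n, _, hp⟩
    simp [PySem.Chars.lower] at hp
    simp [pvMkOf] at hp
  | cons c t ih =>
    intro j
    unfold pvR at h
    split_ifs at h with hc
    cases j with
    | zero => rw [pvP_zero]; intro hz; exact hc ⟨hz.1, hz.2⟩
    | succ j =>
      rw [pvP_succ]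
      have ht : pvR t = none := by
        cases hr : pvR t with
        | none => rfl
        | some v => rw [hr] at h; simp at h
      exact ih ht j

theorem pvR_some {L : List Char} : ∀ {j : Nat}, pvR L = some j →
    pvP L j ∧ ∀ i < j, ¬ pvP L i := by
  induction L with
  | nil => intro j h; simp [pvR] at h
  | cons c t ih =>
    intro j h
    unfold pvR at h
    split_ifs at h with hc
    · have hj : j = 0 := by simpa using h.symm
      subst hj
      exact ⟨(pvP_zero c t).mpr ⟨hc.1, hc.2⟩, by omega⟩
    · cases hr : pvR t <;> rw [hr] at h
      · simp at h
      · rename_i j'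
        have hj : j = j' + 1 := by simpa using h.symm
        subst hj
        rcases ih hr with ⟨h1, h2⟩
        constructor
        · exact (pvP_succ c t j').mpr h1
        · intro i hi
          cases i with
          | zero => rw [pvP_zero]; intro hz; exact hc ⟨hz.1, hz.2⟩
          | succ i => rw [pvP_succ]; exact h2 i (by omega)

-- === the fold over markers ===
def pvFoldA (low : List Char) (ps : List (List Char)) (b : Int) : Int :=
  ps.foldl (fun best marker =>
      let idx := PySem.Chars.find low marker
      if idx ≠ -1 then
        let candidate_start := idx + 1
        if candidate_start < best then candidate_start else best
      else best) b

theorem pvFoldA_all_neg {low : List Char} {ps : List (List Char)}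
    (h : ∀ mk ∈ ps, PySem.Chars.find low mk = -1) : ∀ b : Int, pvFoldA low ps b = b := by
  induction ps with
  | nil => intro b; rfl
  | cons mk ps ih =>
    intro b
    have h1 := h mk List.mem_cons_self
    have hstep : pvFoldA low (mk :: ps) b = pvFoldA low ps b := by
      simp only [pvFoldA, List.foldl_cons, h1]
      norm_num
    rw [hstep]
    exact ih (fun m hm => h m (List.mem_cons_of_mem _ hm)) b

theorem pvFoldA_char (low : List Char) (ps : List (List Char)) : ∀ b : Int,
    (pvFoldA low ps b = b ∨ ∃ mk ∈ ps, PySem.Chars.find low mk ≠ -1 ∧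
        pvFoldA low ps b = PySem.Chars.find low mk + 1)
    ∧ pvFoldA low ps b ≤ b
    ∧ ∀ mk ∈ ps, PySem.Chars.find low mk ≠ -1 → pvFoldA low ps b ≤ PySem.Chars.find low mk + 1 := by
  induction ps with
  | nil => intro b; exact ⟨Or.inl rfl, le_refl b, by simp⟩
  | cons mk ps ih =>
    intro b
    set b' := (if PySem.Chars.find low mk ≠ -1 then
        (if PySem.Chars.find low mk + 1 < b then PySem.Chars.find low mk + 1 else b)
      else b) with hb'
    have hfold : pvFoldA low (mk :: ps) b = pvFoldA low ps b' := rfl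
    rcases ih b' with ⟨hA, hB, hC⟩
    have hble : b' ≤ b := by
      rw [hb']; split_ifs <;> omega
    have hbmk : PySem.Chars.find low mk ≠ -1 → b' ≤ PySem.Chars.find low mk + 1 := by
      intro hne; rw [hb']; split_ifs <;> omega
    refine ⟨?_, ?_, ?_⟩
    · rcases hA with hA | ⟨m, hm, hne, he⟩
      · rw [hfold, hA, hb']
        split_ifs with h1 h2
        · exact Or.inr ⟨mk, List.mem_cons_self, h1, rfl⟩
        · exact Or.inl rfl
        · exact Or.inl rfl
      · exact Or.inr ⟨m, List.mem_cons_of_mem _ hm, hne, hfold ▸ he⟩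
    · rw [hfold]; exact le_trans hB hble
    · intro m hm hne
      rcases List.mem_cons.mp hm with rfl | hm'
      · rw [hfold]; exact le_trans hB (hbmk hne)
      · rw [hfold]; exact hC m hm' hne

-- === split1 facts ===
theorem pvSplit1_ne_nil (L : List Char) : pvSplit1 L ≠ [] := by
  induction L with
  | nil => simp [pvSplit1]
  | cons c t ih =>
    unfold pvSplit1
    split_ifs
    · simp
    · cases h : pvSplit1 t with
      | nil => exact absurd h ih
      | cons a b => simp

theorem pvSplit1_slashfree (L : List Char) : ∀ s ∈ pvSplit1 L, '/' ∉ s := by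
  induction L with
  | nil => simp [pvSplit1]
  | cons c t ih =>
    unfold pvSplit1
    split_ifs with hc
    · intro s hs
      rcases List.mem_cons.mp hs with rfl | hs'
      · simp
      · exact ih s hs'
    · intro s hs
      cases hsp : pvSplit1 t with
      | nil => exact absurd hsp (pvSplit1_ne_nil t)
      | cons h0 tl =>
        rw [hsp] at hs
        simp only [List.modifyHead] at hs
        rcases List.mem_cons.mp hs with rfl | hs'
        · intro hm
          rcases List.mem_cons.mp hm with rfl | hm'
          · exact hc rfl
          · exact ih h0 (hsp ▸ List.mem_cons_self) hm'
        · exact ih s (hsp ▸ List.mem_cons_of_mem _ hs')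

theorem pvGo_eq : ∀ (fuel : Nat) (l cur : List Char) (acc : List (List Char)),
    l.length ≤ fuel →
    PySem.Chars.splitOn.go ['/'] fuel l cur acc
      = acc.reverse ++ (pvSplit1 l).modifyHead (cur.reverse ++ ·) := by
  intro fuel
  induction fuel with
  | zero =>
    intro l cur acc hl
    have : l = [] := List.length_eq_zero_iff.mp (Nat.le_zero.mp hl)
    subst this
    simp [PySem.Chars.splitOn.go, pvSplit1]
  | succ fuel ih =>
    intro l cur acc hl
    cases l with
    | nil => simp [PySem.Chars.splitOn.go, pvSplit1]
    | cons c rest =>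
      show PySem.Chars.splitOn.go ['/'] (fuel+1) (c :: rest) cur acc = _
      rw [PySem.Chars.splitOn.go]
      by_cases hc : c = '/'
      · subst hc
        rw [if_pos (by simp [List.isPrefixOf])]
        simp only [List.length_cons] at hl
        rw [ih _ [] (cur.reverse :: acc) (by simpa using hl)]
        simp only [pvSplit1, if_true]
        cases h : pvSplit1 rest with
        | nil => exact absurd h (pvSplit1_ne_nil rest)
        | cons a b => simp [h]
      · rw [if_neg (by intro hps; simp [List.isPrefixOf] at hps; exact hc hps.symm)]
        simp only [List.length_cons] at hl
        rw [ih rest (c :: cur) acc (by omega)]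
        simp only [pvSplit1, if_neg hc]
        cases hsp : pvSplit1 rest with
        | nil => exact absurd hsp (pvSplit1_ne_nil rest)
        | cons h0 tl => simp

theorem pvSplitOn_eq (L : List Char) : PySem.Chars.splitOn L ['/'] = pvSplit1 L := by
  rw [PySem.Chars.splitOn, pvGo_eq (L.length + 1) L [] [] (by omega)]
  cases hsp : pvSplit1 L with
  | nil => exact absurd hsp (pvSplit1_ne_nil L)
  | cons h0 tl => simp

theorem pvSplit1_join (L : List Char) : PySem.Chars.join ['/'] (pvSplit1 L) = L := by
  induction L with
  | nil => rw [show pvSplit1 [] = [[]] from rfl, PySem.Chars.join_singleton]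
  | cons c t ih =>
    unfold pvSplit1
    split_ifs with hc
    · subst hc
      cases hsp : pvSplit1 t with
      | nil => exact absurd hsp (pvSplit1_ne_nil t)
      | cons h0 tl =>
        rw [hsp] at ih
        rw [PySem.Chars.join_cons_cons]
        simpa using ih
    · cases hsp : pvSplit1 t with
      | nil => exact absurd hsp (pvSplit1_ne_nil t)
      | cons h0 tl =>
        rw [hsp] at ih
        simp only [List.modifyHead]
        cases tl with
        | nil =>
          rw [PySem.Chars.join_singleton] at ih ⊢
          simp [ih]
        | cons t1 tl' =>
          rw [PySem.Chars.join_cons_cons] at ih ⊢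
          simpa using ih

theorem pvLastSeg_aux (L : List Char) : ∀ acc : List Char,
    L.foldl (fun acc c => if c = '/' then [] else acc ++ [c]) acc
      = ((pvSplit1 L).modifyHead (acc ++ ·)).getLastD [] := by
  induction L with
  | nil => intro acc; simp [pvSplit1]
  | cons c t ih =>
    intro acc
    rw [List.foldl_cons]
    by_cases hc : c = '/'
    · subst hc
      rw [if_pos rfl, ih []]
      simp only [pvSplit1, List.modifyHead]
      cases hsp : pvSplit1 t with
      | nil => exact absurd hsp (pvSplit1_ne_nil t)
      | cons h0 tl => simp
    · rw [if_neg hc, ih (acc ++ [c])]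
      simp only [pvSplit1, if_neg hc]
      cases hsp : pvSplit1 t with
      | nil => exact absurd hsp (pvSplit1_ne_nil t)
      | cons h0 tl => simp

theorem pvLastSeg_foldl (L : List Char) :
    L.foldl (fun acc c => if c = '/' then [] else acc ++ [c]) [] = (pvSplit1 L).getLastD [] := by
  rw [pvLastSeg_aux L []]
  cases hsp : pvSplit1 L with
  | nil => exact absurd hsp (pvSplit1_ne_nil L)
  | cons h0 tl => simp

-- === hit at a segment boundary ===
theorem pvPrefix_marker : ∀ (a b r : List Char), '/' ∉ a → '/' ∉ b →
    (((a ++ ['/']) <+: (b ++ '/' :: r)) ↔ a = b) := by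
  intro a
  induction a with
  | nil =>
    intro b r _ hb
    cases b with
    | nil => simp
    | cons y b' =>
      simp only [List.nil_append, List.cons_append, List.cons_prefix_cons]
      constructor
      · rintro ⟨h1, _⟩; exact absurd h1.symm (fun he => hb (he ▸ List.mem_cons_self))
      · intro h; exact absurd h (by simp)
  | cons x a' ih =>
    intro b r ha hb
    cases b with
    | nil =>
      simp only [List.nil_append, List.cons_append, List.cons_prefix_cons]
      constructor
      · rintro ⟨h1, _⟩; exact absurd h1 (fun he => ha (he ▸ List.mem_cons_self))
      · intro h; exact absurd h (by simp)
    | cons y b' =>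
      simp only [List.cons_append, List.cons_prefix_cons]
      have ha' : '/' ∉ a' := fun hm => ha (List.mem_cons_of_mem _ hm)
      have hb' : '/' ∉ b' := fun hm => hb (List.mem_cons_of_mem _ hm)
      rw [ih b' r ha' hb']
      constructor
      · rintro ⟨rfl, rfl⟩; rfl
      · intro h; injection h with h1 h2; exact ⟨h1, h2⟩

theorem pvLower_append_slash (s1 r : List Char) : PySem.Chars.lower (s1 ++ '/' :: r)
    = PySem.Chars.lower s1 ++ '/' :: PySem.Chars.lower r := by
  simp [PySem.Chars.lower, PySem.Chars.lowerChar, PySem.Chars.isupper]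

theorem pvHit_cons {s1 : List Char} (h : '/' ∉ s1) (r : List Char) :
    (pvHit (s1 ++ '/' :: r) = true ↔ PySem.Chars.lower s1 ∈ pvNames) := by
  unfold pvHit
  rw [List.any_eq_true]
  constructor
  · rintro ⟨n, hn, hp⟩
    have := (pvPrefix_marker n (PySem.Chars.lower s1) (PySem.Chars.lower r)
      (pvNames_slashfree n hn) (pvSlash_mem_lower h)).mp
      (by rw [← pvLower_append_slash]; exact List.isPrefixOf_iff_prefix.mp hp)
    exact this ▸ hn
  · intro hm
    refine ⟨PySem.Chars.lower s1, hm, List.isPrefixOf_iff_prefix.mpr ?_⟩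
    rw [pvLower_append_slash]
    exact (pvPrefix_marker _ _ _ (pvSlash_mem_lower h) (pvSlash_mem_lower h)).mpr rfl

-- === the common characterisation ===
def pvSpecFun (L : List Char) : List Char :=
  match pvR L with
  | some j => L.drop (j + 1)
  | none => (pvSplit1 L).getLastD []

theorem pvA_char (fp : String) :
    best_guess_relative_py fp = String.ofList (pvSpecFun fp.toList) := by
  show (if pvFoldA (PySem.Chars.lower fp.toList) pvMarkers ((PySem.Chars.len fp.toList : Int))
        < (PySem.Chars.len fp.toList : Int)
      then String.ofList (PySem.Chars.slice fp.toList
        (some (pvFoldA (PySem.Chars.lower fp.toList) pvMarkers ((PySem.Chars.len fp.toList : Int)))) none)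
      else String.ofList (fp.toList.foldl (fun acc c => if c = '/' then [] else acc ++ [c]) []))
    = String.ofList (pvSpecFun fp.toList)
  rw [PySem.Chars.len_eq]
  unfold pvSpecFun
  set L := fp.toList with hL
  set low := PySem.Chars.lower L with hlow
  cases hR : pvR L with
  | none =>
    have hnone : ∀ mk ∈ pvMarkers, PySem.Chars.find low mk = -1 := by
      intro mk hmk
      by_contra hne
      have hinf : mk <:+: low := (PySem.Chars.find_ne_neg_one_iff low mk).mp hne
      rcases (PySem.Chars.exists_prefix_drop_iff_isIn mk low).mpr
        ((PySem.Chars.isIn_iff_infix mk low).mpr hinf) with ⟨j, hj⟩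
      rcases List.mem_map.mp (pvMarkers_eq ▸ hmk) with ⟨n, hn, rfl⟩
      exact pvR_none hR j ⟨n, hn, hj⟩
    rw [pvFoldA_all_neg hnone]
    rw [if_neg (by omega)]
    rw [pvLastSeg_foldl]
  | some j =>
    rcases pvR_some hR with ⟨⟨n0, hn0, hp0⟩, hmin⟩
    set mk0 := pvMkOf n0 with hmk0
    have hmk0mem : mk0 ∈ pvMarkers := pvMarkers_eq ▸ List.mem_map.mpr ⟨n0, hn0, rfl⟩
    have hinf : mk0 <:+: low := by
      rw [← PySem.Chars.isIn_iff_infix, ← PySem.Chars.exists_prefix_drop_iff_isIn]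
      exact ⟨j, hp0⟩
    have hfge : 0 ≤ PySem.Chars.find low mk0 := (PySem.Chars.find_nonneg_iff low mk0).mpr hinf
    rcases PySem.Chars.find_spec hfge with ⟨hfp, hfmin⟩
    have htoNat : (PySem.Chars.find low mk0).toNat = j := by
      have h1 : ¬ j < (PySem.Chars.find low mk0).toNat := fun hlt => hfmin j hlt hp0
      have h2 : ¬ (PySem.Chars.find low mk0).toNat < j := fun hlt =>
        hmin _ hlt ⟨n0, hn0, hfp⟩
      omega
    have hlen : low.length = L.length := by
      rw [hlow]; simp [PySem.Chars.lower]
    have hjlen : j + 2 ≤ L.length := by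
      have h1 := List.IsPrefix.length_le hp0
      rw [List.length_drop, hlen] at h1
      have h3 : 2 ≤ mk0.length := by simp [hmk0, pvMkOf]
      omega
    have hup : pvFoldA low pvMarkers (L.length : Int) ≤ (j : Int) + 1 := by
      have := (pvFoldA_char low pvMarkers (L.length : Int)).2.2 mk0 hmk0mem (by omega)
      omega
    have hdown : ((j : Int) + 1) ≤ pvFoldA low pvMarkers (L.length : Int) := by
      rcases (pvFoldA_char low pvMarkers (L.length : Int)).1 with he | ⟨m, hm, hne, he⟩
      · rw [he]; omega
      · have hge : 0 ≤ PySem.Chars.find low m := by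
          have := PySem.Chars.neg_one_le_find low m
          omega
        rcases PySem.Chars.find_spec hge with ⟨hmp, _⟩
        rcases List.mem_map.mp (pvMarkers_eq ▸ hm) with ⟨n, hn, rfl⟩
        have hPm : pvP L (PySem.Chars.find low (pvMkOf n)).toNat := ⟨n, hn, hmp⟩
        have : ¬ (PySem.Chars.find low (pvMkOf n)).toNat < j := fun hlt => hmin _ hlt hPm
        rw [he]
        omega
    have hbest : pvFoldA low pvMarkers (L.length : Int) = (j : Int) + 1 := le_antisymm hup hdown
    rw [hbest]
    rw [if_pos (by omega)]
    have hslice : PySem.Chars.slice L (some ((j : Int) + 1)) none = L.drop (j + 1) := by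
      rw [PySem.Chars.slice_eq_listSlice]
      have : ((j : Int) + 1) = ((j + 1 : Nat) : Int) := by push_cast; ring
      rw [this, PySem.List.slice_from_natCast]
    rw [hslice]

theorem pvContains_iff (x : List Char) : pvMarkerNames.contains x = true ↔ x ∈ pvNames := by
  rw [show pvMarkerNames = PySem.Set.ofList pvNames from rfl, PySem.Set.contains_iff,
    PySem.Set.mem_ofList]

theorem pvGo_char : ∀ ss : List (List Char), ss ≠ [] → (∀ s ∈ ss, '/' ∉ s) →
    pvAltGo ss = (match pvR ('/' :: PySem.Chars.join ['/'] ss) with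
      | some j => ('/' :: PySem.Chars.join ['/'] ss).drop (j + 1)
      | none => ss.getLastD []) := by
  intro ss
  induction ss with
  | nil => intro h; exact absurd rfl h
  | cons s1 rest ih =>
    intro _ hf
    have hs1 : '/' ∉ s1 := hf s1 List.mem_cons_self
    cases rest with
    | nil =>
      have h1 : pvR s1 = none := by
        have := pvR_nosep hs1 []
        simpa using this
      have h2 : pvR ('/' :: PySem.Chars.join ['/'] [s1]) = none := by
        rw [PySem.Chars.join_singleton]
        show (if '/' = '/' ∧ pvHit s1 then some 0 else (pvR s1).map (· + 1)) = none
        rw [if_neg (by simp [pvHit_false_of_slashfree hs1]), h1]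
        rfl
      rw [show pvAltGo [s1] = s1 from rfl, h2]
      rfl
    | cons s2 rest2 =>
      have hs2free : ∀ s ∈ s2 :: rest2, '/' ∉ s := fun s hs => hf s (List.mem_cons_of_mem _ hs)
      set X := PySem.Chars.join ['/'] (s2 :: rest2) with hX
      have hJ : PySem.Chars.join ['/'] (s1 :: s2 :: rest2) = s1 ++ '/' :: X := by
        rw [PySem.Chars.join_cons_cons, ← hX]
        simp
      by_cases hmem : PySem.Chars.lower s1 ∈ pvNames
      · have hgo : pvAltGo (s1 :: s2 :: rest2) = PySem.Chars.join ['/'] (s1 :: s2 :: rest2) := by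
          show (if pvMarkerNames.contains (PySem.Chars.lower s1) then _ else _) = _
          rw [if_pos ((pvContains_iff _).mpr hmem)]
        have hfull : pvR ('/' :: PySem.Chars.join ['/'] (s1 :: s2 :: rest2)) = some 0 := by
          rw [hJ]
          show (if '/' = '/' ∧ pvHit (s1 ++ '/' :: X) then some 0
            else (pvR (s1 ++ '/' :: X)).map (· + 1)) = some 0
          rw [if_pos ⟨rfl, (pvHit_cons hs1 X).mpr hmem⟩]
        rw [hgo, hfull, hJ]
        rfl
      · have hgo : pvAltGo (s1 :: s2 :: rest2) = pvAltGo (s2 :: rest2) := by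
          show (if pvMarkerNames.contains (PySem.Chars.lower s1) then _ else _) = _
          rw [if_neg (fun hcon => hmem ((pvContains_iff _).mp hcon))]
        have hnohit : ¬ ('/' = '/' ∧ pvHit (s1 ++ '/' :: X) = true) := by
          rintro ⟨_, hh⟩
          exact hmem ((pvHit_cons hs1 X).mp hh)
        rw [hgo, ih (by simp) hs2free, hJ]
        cases hx : pvR ('/' :: X) with
        | none =>
          have hfull : pvR ('/' :: (s1 ++ '/' :: X)) = none := by
            show (if '/' = '/' ∧ pvHit (s1 ++ '/' :: X) then some 0
              else (pvR (s1 ++ '/' :: X)).map (· + 1)) = none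
            rw [if_neg hnohit, pvR_nosep hs1 ('/' :: X), hx]
            rfl
          rw [hfull]
          simp only [List.getLastD_cons]
        | some j =>
          have hfull : pvR ('/' :: (s1 ++ '/' :: X)) = some (s1.length + (j + 1)) := by
            show (if '/' = '/' ∧ pvHit (s1 ++ '/' :: X) then some 0
              else (pvR (s1 ++ '/' :: X)).map (· + 1)) = some (s1.length + (j + 1))
            rw [if_neg hnohit, pvR_nosep hs1 ('/' :: X), hx]
            simp
            omega
          rw [hfull]
          show List.drop (j + 1) ('/' :: X)
            = List.drop (s1.length + (j + 1) + 1) ('/' :: (s1 ++ '/' :: X))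
          conv_rhs => rw [List.drop_succ_cons, List.drop_length_add_append]

theorem pvB_char (fp : String) :
    best_guess_relative_py_alt fp = String.ofList (pvSpecFun fp.toList) := by
  unfold best_guess_relative_py_alt pvSpecFun
  rw [pvSplitOn_eq]
  have hjoin := pvSplit1_join fp.toList
  cases hsp : pvSplit1 fp.toList with
  | nil => exact absurd hsp (pvSplit1_ne_nil fp.toList)
  | cons s0 rest =>
    rw [hsp] at hjoin
    have hfree := hsp ▸ pvSplit1_slashfree fp.toList
    have hs0 : '/' ∉ s0 := hfree s0 List.mem_cons_self
    cases rest with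
    | nil =>
      rw [PySem.Chars.join_singleton] at hjoin
      have hR : pvR fp.toList = none := by
        rw [← hjoin]
        have := pvR_nosep hs0 []
        simpa using this
      rw [hR]
      rfl
    | cons s1 rest2 =>
      have hrfree : ∀ s ∈ s1 :: rest2, '/' ∉ s := fun s hs => hfree s (List.mem_cons_of_mem _ hs)
      set X := PySem.Chars.join ['/'] (s1 :: rest2) with hX
      have hJ : fp.toList = s0 ++ '/' :: X := by
        rw [← hjoin, PySem.Chars.join_cons_cons, ← hX]
        simp
      have hgo := pvGo_char (s1 :: rest2) (by simp) hrfree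
      have hR : pvR fp.toList = (pvR ('/' :: X)).map (· + s0.length) := by
        rw [hJ]
        exact pvR_nosep hs0 ('/' :: X)
      cases hx : pvR ('/' :: X) with
      | none =>
        rw [hx] at hR hgo
        rw [hR]
        show String.ofList (pvAltGo (s1 :: rest2))
          = String.ofList ((s0 :: s1 :: rest2).getLastD [])
        rw [hgo]
        simp only [List.getLastD_cons]
      | some j =>
        rw [hx] at hR hgo
        simp only [Option.map_some] at hR
        rw [hR]
        show String.ofList (pvAltGo (s1 :: rest2))
          = String.ofList (List.drop (j + s0.length + 1) fp.toList)
        rw [hgo, hJ]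
        have hdr : List.drop (j + s0.length + 1) (s0 ++ '/' :: X)
            = List.drop (j + 1) ('/' :: X) := by
          have h1 : j + s0.length + 1 = s0.length + (j + 1) := by omega
          rw [h1, List.drop_length_add_append]
        rw [hdr]

-- ===== VERDICT (by name: the statement is the Claim_ definition above) =====
theorem best_guess_relative_py_spec : Claim_equal_best_guess_relative_py := by
  intro fp _
  unfold Spec_best_guess_relative_py
  rw [pvA_char, pvB_char]
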